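-- pv_equiv track=rewrite | github.com/avapilot/avapilot | avapilot/generator/analyzer.py | solidity_type_to_python
-- ===== SOURCE A (Python) =====
-- def solidity_type_to_python(sol_type: str) -> str:
--     """Convert Solidity type to Python type hint."""
--     if sol_type.startswith("uint") or sol_type.startswith("int"):
--         return "int"
--     elif sol_type == "address":
--         return "str"
--     elif sol_type == "bool":
--         return "bool"
--     elif sol_type == "string":
--         return "str"
--     elif sol_type.startswith("bytes"):
--         return "str"
--     elif sol_type.endswith("[]"):
--         inner = solidity_type_to_python(sol_type[:-2])
--         return f"list[{inner}]"
--     elif sol_type == "tuple":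
--         return "list"
--     else:
--         return "str"
-- ===== SOURCE B (Python) =====
-- def solidity_type_to_python(sol_type: str) -> str:
--     """Convert Solidity type to Python type hint (iterative: peel array suffixes, then wrap)."""
--     t = sol_type
--     depth = 0
--     while True:
--         if t.startswith("uint") or t.startswith("int"):
--             base = "int"
--         elif t == "address" or t == "string":
--             base = "str"
--         elif t == "bool":
--             base = "bool"
--         elif t.startswith("bytes"):
--             base = "str"
--         elif t.endswith("[]"):
--             t = t[:-2]
--             depth += 1
--             continue
--         elif t == "tuple":
--             base = "list"
--         else:
--             base = "str"
--         break
--     return "list[" * depth + base + "]" * depth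
-- ===== Notes on version B (the rewrite author's own statement) =====
-- stated objective: alternative
-- what changed: Replaced A's recursion on the array suffix with an iterative loop that peels trailing '[]' while counting depth, then builds the result once with string repetition 'list['*depth + base + ']'*depth.
import Mathlib
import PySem

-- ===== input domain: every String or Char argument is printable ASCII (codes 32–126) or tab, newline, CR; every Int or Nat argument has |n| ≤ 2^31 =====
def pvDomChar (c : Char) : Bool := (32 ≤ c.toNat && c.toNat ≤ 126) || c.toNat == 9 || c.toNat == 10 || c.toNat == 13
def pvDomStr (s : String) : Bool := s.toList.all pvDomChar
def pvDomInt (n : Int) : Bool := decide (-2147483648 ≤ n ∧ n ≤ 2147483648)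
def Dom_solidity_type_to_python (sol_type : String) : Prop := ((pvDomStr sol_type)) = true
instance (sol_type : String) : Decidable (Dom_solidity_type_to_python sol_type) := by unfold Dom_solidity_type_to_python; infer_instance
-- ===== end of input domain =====

-- One honest line: B peels trailing "[]" iteratively with a depth counter and wraps once at the end,
-- instead of A's recursion; same values on every input (both total).

-- If "[]" is a suffix of cs then cs[:-2] is strictly shorter (termination of both ports).
theorem pvSliceLenLt (cs : List Char) (h : PySem.Chars.endswith cs "[]".toList = true) :
    (PySem.List.slice cs none (some (-2))).length < cs.length := by
  rw [PySem.List.slice_to_neg_ofNat cs 2 (by omega)]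
  have h2 : "[]".toList.length ≤ cs.length :=
    List.IsSuffix.length_le ((PySem.Chars.endswith_iff cs _).mp h)
  simp at h2 ⊢
  omega

-- ===== PORT A =====
-- Exact over List Char (PySem.Chars primitives); wrapper rebuilds the String.
def pvACore (cs : List Char) : List Char :=
  if PySem.Chars.startswith cs "uint".toList || PySem.Chars.startswith cs "int".toList then
    "int".toList
  else if cs = "address".toList then "str".toList
  else if cs = "bool".toList then "bool".toList
  else if cs = "string".toList then "str".toList
  else if PySem.Chars.startswith cs "bytes".toList then "str".toList
  else if _h : PySem.Chars.endswith cs "[]".toList then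
    "list[".toList ++ pvACore (PySem.List.slice cs none (some (-2))) ++ "]".toList
  else if cs = "tuple".toList then "list".toList
  else "str".toList
termination_by cs.length
decreasing_by exact pvSliceLenLt cs _h

def solidity_type_to_python (sol_type : String) : String :=
  String.ofList (pvACore sol_type.toList)

-- ===== PORT B =====
-- The while-loop of Source B as a tail recursion over (t, depth); returns (base, depth).
def pvBLoop (cs : List Char) (depth : Nat) : List Char × Nat :=
  if PySem.Chars.startswith cs "uint".toList || PySem.Chars.startswith cs "int".toList then
    ("int".toList, depth)
  else if cs = "address".toList ∨ cs = "string".toList then ("str".toList, depth)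
  else if cs = "bool".toList then ("bool".toList, depth)
  else if PySem.Chars.startswith cs "bytes".toList then ("str".toList, depth)
  else if h : PySem.Chars.endswith cs "[]".toList then
    pvBLoop (PySem.List.slice cs none (some (-2))) (depth + 1)
  else if cs = "tuple".toList then ("list".toList, depth)
  else ("str".toList, depth)
termination_by cs.length
decreasing_by exact pvSliceLenLt cs h

def solidity_type_to_python_alt (sol_type : String) : String :=
  let r := pvBLoop sol_type.toList 0
  String.ofList ((List.replicate r.2 "list[".toList).flatten ++ r.1 ++ List.replicate r.2 ']')

-- ===== PRECONDITION & SPEC =====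
def Spec_solidity_type_to_python (sol_type : String) (out : String) : Prop := out = solidity_type_to_python_alt sol_type
instance (sol_type : String) (out : String) : Decidable (Spec_solidity_type_to_python sol_type out) := by unfold Spec_solidity_type_to_python; infer_instance

-- ===== CLAIM (what is proved, stated in full; the proofs are below) =====
def Claim_equal_solidity_type_to_python : Prop := ∀ (sol_type : String), Dom_solidity_type_to_python sol_type → Spec_solidity_type_to_python sol_type (solidity_type_to_python sol_type)

-- ===== LEMMAS AND PROOFS =====

-- Loop invariant: wrapping pvBLoop's result equals d layers of "list[…]" around pvACore's result.
theorem pvLoopEq (cs : List Char) (d : Nat) :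
    (List.replicate (pvBLoop cs d).2 "list[".toList).flatten ++ (pvBLoop cs d).1
      ++ List.replicate (pvBLoop cs d).2 ']'
    = (List.replicate d "list[".toList).flatten ++ pvACore cs ++ List.replicate d ']' := by
  unfold pvBLoop pvACore
  split_ifs with h1 h2 h3 h4 h5 h6 h7 h8 h9 h10 h11 h12 h13 h14 h15 <;>
    first
      | rfl
      | tauto
      | (simp_all; done)
      | (rw [pvLoopEq (PySem.List.slice cs none (some (-2))) (d + 1), List.replicate_succ']
         simp [List.flatten_append, List.append_assoc, List.replicate_succ])
termination_by cs.length
decreasing_by exact pvSliceLenLt cs (by assumption)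

-- ===== VERDICT (by name: the statement is the Claim_ definition above) =====
theorem solidity_type_to_python_spec : Claim_equal_solidity_type_to_python := by
  intro sol_type _
  unfold Spec_solidity_type_to_python solidity_type_to_python solidity_type_to_python_alt
  show String.ofList (pvACore sol_type.toList)
      = String.ofList ((List.replicate (pvBLoop sol_type.toList 0).2 "list[".toList).flatten
          ++ (pvBLoop sol_type.toList 0).1 ++ List.replicate (pvBLoop sol_type.toList 0).2 ']')
  rw [pvLoopEq sol_type.toList 0]
  simp
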